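-- pv_equiv track=rewrite | github.com/robo919/ML_BASED_PH | src/ultra_feature_extractor.py | _max_char_repetition
-- ===== SOURCE A (Python) =====
-- def _max_char_repetition(text: str) -> int:
--     """Find maximum character repetition"""
--     if not text:
--         return 0
--     max_count = 1
--     current_count = 1
--     for i in range(1, len(text)):
--         if text[i] == text[i-1]:
--             current_count += 1
--             max_count = max(max_count, current_count)
--         else:
--             current_count = 1
--     return max_count
-- ===== SOURCE B (Python) =====
-- def _max_char_repetition(text: str) -> int:
--     """Max consecutive repetition = largest gap between change-point indices."""
--     if not text:
--         return 0
--     n = len(text)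
--     cuts = [0] + [i for i in range(1, n) if text[i] != text[i - 1]] + [n]
--     return max(b - a for a, b in zip(cuts, cuts[1:]))
-- ===== Notes on version B (the rewrite author's own statement) =====
-- stated objective: alternative
-- what changed: B computes the list of change-point indices (positions where the character differs from its predecessor, plus the endpoints 0 and n) and returns the maximum difference between consecutive boundaries, instead of A's scan maintaining current/max run counters.
import Mathlib
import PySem

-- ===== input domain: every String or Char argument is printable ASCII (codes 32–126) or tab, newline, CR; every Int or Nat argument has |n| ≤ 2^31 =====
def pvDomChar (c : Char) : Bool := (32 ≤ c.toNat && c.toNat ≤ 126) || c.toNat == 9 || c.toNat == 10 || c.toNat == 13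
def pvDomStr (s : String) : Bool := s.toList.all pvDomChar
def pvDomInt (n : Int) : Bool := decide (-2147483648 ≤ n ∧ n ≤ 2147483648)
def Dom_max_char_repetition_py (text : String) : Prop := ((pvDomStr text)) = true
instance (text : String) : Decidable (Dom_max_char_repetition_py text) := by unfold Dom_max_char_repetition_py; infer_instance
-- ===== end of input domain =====

-- B computes the change-point indices (where the character differs from its predecessor,
-- plus endpoints 0 and n) and returns the maximum gap between consecutive boundaries,
-- instead of A's counter scan; same O(n), a genuinely different decomposition.


-- ===== PORT A =====
-- literal transliteration: empty guard, then for i in range(1, len(text)) carrying (max_count, current_count)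
def max_char_repetition_py (text : String) : Int :=
  let cs := text.toList
  if cs = [] then 0
  else
    ((PySem.List.pyRange 1 (PySem.List.len cs) 1).foldl
      (fun (p : Int × Int) i =>
        if PySem.List.pyGetD cs i ' ' = PySem.List.pyGetD cs (i - 1) ' '
        then (max p.1 (p.2 + 1), p.2 + 1)
        else (p.1, 1))
      (1, 1)).1

-- ===== PORT B =====
-- Source B: cuts = [0] + [i for i in range(1, n) if text[i] != text[i-1]] + [n];
--       max(b - a for a, b in zip(cuts, cuts[1:]))  (the [] arm is unreachable: cuts has ≥ 2
--       elements, so the generator handed to max is nonempty and Python's max returns)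
def max_char_repetition_py_alt (text : String) : Int :=
  let cs := text.toList
  if cs = [] then 0
  else
    let n : Int := PySem.List.len cs
    let cuts : List Int :=
      [0] ++ ((PySem.List.pyRange 1 n 1).filter
        (fun i => !(PySem.List.pyGetD cs i ' ' == PySem.List.pyGetD cs (i - 1) ' '))) ++ [n]
    match (cuts.zip cuts.tail).map (fun p : Int × Int => p.2 - p.1) with
    | [] => 0
    | g :: gs => gs.foldl max g

-- ===== PRECONDITION & SPEC =====
def Spec_max_char_repetition_py (text : String) (out : Int) : Prop := out = max_char_repetition_py_alt text
instance (text : String) (out : Int) : Decidable (Spec_max_char_repetition_py text out) := by unfold Spec_max_char_repetition_py; infer_instance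

-- ===== CLAIM (what is proved, stated in full; the proofs are below) =====
def Claim_equal_max_char_repetition_py : Prop := ∀ (text : String), Dom_max_char_repetition_py text → Spec_max_char_repetition_py text (max_char_repetition_py text)

-- ===== LEMMAS AND PROOFS =====

-- gaps between consecutive boundaries, previous boundary carried along
def pvGaps (prev : Int) : List Int → List Int
  | [] => []
  | x :: xs => (x - prev) :: pvGaps x xs

lemma pvZipGaps : ∀ (l : List Int) (prev : Int),
    (((prev :: l).zip l).map (fun p : Int × Int => p.2 - p.1)) = pvGaps prev l := by
  intro l
  induction l with
  | nil => intro prev; rfl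
  | cons x xs ih => intro prev; simp only [List.zip_cons_cons, List.map_cons, pvGaps, ih]

lemma pvAbsorb (last x d acc : Int) (xs : List Int) (h : d ≤ x - last) :
    (pvGaps last (x :: xs)).foldl max (max acc d) = (pvGaps last (x :: xs)).foldl max acc := by
  simp only [pvGaps, List.foldl_cons]
  congr 1
  omega

-- A's counter fold from position a onward, with last change point `last`, equals the
-- max over the remaining boundary gaps, folded into maxc
lemma pvMain (cs : List Char) : ∀ (fuel : Nat) (a last maxc : Int),
    1 ≤ a → a ≤ PySem.List.len cs → fuel = (PySem.List.len cs - a).toNat →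
    0 ≤ last → last ≤ a - 1 → a - last ≤ maxc →
    ((PySem.List.pyRange a (PySem.List.len cs) 1).foldl
      (fun (p : Int × Int) i =>
        if PySem.List.pyGetD cs i ' ' = PySem.List.pyGetD cs (i - 1) ' '
        then (max p.1 (p.2 + 1), p.2 + 1)
        else (p.1, 1))
      (maxc, a - last)).1
    = (pvGaps last
        (((PySem.List.pyRange a (PySem.List.len cs) 1).filter
          (fun i => !(PySem.List.pyGetD cs i ' ' == PySem.List.pyGetD cs (i - 1) ' '))) ++
          [PySem.List.len cs])).foldl max maxc := by
  intro fuel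
  induction fuel with
  | zero =>
      intro a last maxc h1 h2 hf _ _ h6
      have ha : a = PySem.List.len cs := by omega
      rw [PySem.List.pyRange_one_eq_nil (le_of_eq ha.symm)]
      simp only [List.foldl_nil, List.filter_nil, List.nil_append, pvGaps, List.foldl_cons,
        List.foldl_nil]
      omega
  | succ f ih =>
      intro a last maxc h1 h2 hf h4 h5 h6
      have hlt : a < PySem.List.len cs := by omega
      rw [PySem.List.pyRange_one_cons hlt]
      simp only [List.foldl_cons, List.filter_cons]
      by_cases hp : PySem.List.pyGetD cs a ' ' = PySem.List.pyGetD cs (a - 1) ' '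
      · -- same char: counter extends, a is not a boundary
        have hb : (!(PySem.List.pyGetD cs a ' ' == PySem.List.pyGetD cs (a - 1) ' ')) = false := by
          simp [hp]
        rw [if_pos hp, hb]
        simp only [Bool.false_eq_true, if_false]
        have hst : ((max maxc (a - last + 1), a - last + 1) : Int × Int)
            = (max maxc (a + 1 - last), (a + 1) - last) := by
          have : a - last + 1 = a + 1 - last := by omega
          rw [this]
        rw [hst, ih (a + 1) last (max maxc (a + 1 - last)) (by omega) (by omega) (by omega)
          (by omega) (by omega) (by omega)]
        -- absorb the extra max: the first remaining gap is at least (a+1) - last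
        cases hfl : (PySem.List.pyRange (a + 1) (PySem.List.len cs) 1).filter
            (fun i => !(PySem.List.pyGetD cs i ' ' == PySem.List.pyGetD cs (i - 1) ' ')) with
        | nil =>
            rw [List.nil_append]
            exact pvAbsorb last (PySem.List.len cs) (a + 1 - last) maxc [] (by omega)
        | cons x xs =>
            have hx : x ∈ PySem.List.pyRange (a + 1) (PySem.List.len cs) 1 := by
              have hmem : x ∈ (PySem.List.pyRange (a + 1) (PySem.List.len cs) 1).filter
                  (fun i => !(PySem.List.pyGetD cs i ' ' == PySem.List.pyGetD cs (i - 1) ' ')) := by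
                rw [hfl]; exact List.mem_cons_self
              exact List.mem_of_mem_filter hmem
            have hxa : a + 1 ≤ x := ((PySem.List.mem_pyRange_one).mp hx).1
            exact pvAbsorb last x (a + 1 - last) maxc (xs ++ [PySem.List.len cs]) (by omega)
      · -- different char: counter resets, a is a boundary
        have hb : (!(PySem.List.pyGetD cs a ' ' == PySem.List.pyGetD cs (a - 1) ' ')) = true := by
          simp [hp]
        rw [if_neg hp, hb]
        simp only [if_true]
        have hst : ((maxc, (1 : Int)) : Int × Int) = (maxc, (a + 1) - a) := by
          have : ((a : Int) + 1) - a = 1 := by omega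
          rw [this]
        rw [hst, ih (a + 1) a maxc (by omega) (by omega) (by omega) (by omega) (by omega)
          (by omega)]
        simp only [List.cons_append, pvGaps, List.foldl_cons]
        have hmx : max maxc (a - last) = maxc := by omega
        rw [hmx]

-- ===== VERDICT (by name: the statement is the Claim_ definition above) =====
theorem max_char_repetition_py_spec : Claim_equal_max_char_repetition_py := by
  intro text _
  unfold Spec_max_char_repetition_py max_char_repetition_py max_char_repetition_py_alt
  cases hcs : text.toList with
  | nil => simp
  | cons c rest =>
      simp only [reduceCtorEq, if_false]
      have hn1 : 1 ≤ PySem.List.len (c :: rest) := by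
        simp [PySem.List.len_eq]
      have hA := pvMain (c :: rest) ((PySem.List.len (c :: rest) - 1).toNat) 1 0 1 le_rfl hn1
        rfl le_rfl (by omega) (by omega)
      simp only [sub_zero] at hA
      rw [hA]
      -- B side: rewrite the zip/map into pvGaps and drop the duplicated head of the fold
      simp only [List.cons_append, List.nil_append, List.tail_cons]
      rw [pvZipGaps]
      cases hfl : (PySem.List.pyRange 1 (PySem.List.len (c :: rest)) 1).filter
          (fun i => !(PySem.List.pyGetD (c :: rest) i ' ' == PySem.List.pyGetD (c :: rest) (i - 1) ' ')) with
      | nil =>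
          simp only [List.nil_append, pvGaps, sub_zero, List.foldl_cons, List.foldl_nil]
          omega
      | cons x xs =>
          have hx : x ∈ PySem.List.pyRange 1 (PySem.List.len (c :: rest)) 1 := by
            have hmem : x ∈ (PySem.List.pyRange 1 (PySem.List.len (c :: rest)) 1).filter
                (fun i => !(PySem.List.pyGetD (c :: rest) i ' ' == PySem.List.pyGetD (c :: rest) (i - 1) ' ')) := by
              rw [hfl]; exact List.mem_cons_self
            exact List.mem_of_mem_filter hmem
          have hx1 : 1 ≤ x := ((PySem.List.mem_pyRange_one).mp hx).1
          simp only [List.cons_append, pvGaps, sub_zero, List.foldl_cons]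
          have hmx : max (1 : Int) x = x := by omega
          rw [hmx]
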